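-- pv_equiv track=rewrite | github.com/min1907/python_learning | DSA/Codility_stack_and_queue.py | grocery_store
-- ===== SOURCE A (Python) =====
-- def grocery_store(A):
--     n = len(A)
--     size, result = 0, 0
--     for i in range(n):
--         if A[i] == 0:
--             size += 1
--         else:
--             size -= 1
--             result = max(result, -size)
--     return result
-- ===== SOURCE B (Python) =====
-- def grocery_store(A):
--     # Divide and conquer: for a segment, compute (total sum, minimum prefix sum)
--     # of the +1/-1 deltas; segments combine by (s1+s2, min(m1, s1+m2)).
--     # The answer is the negated minimum prefix sum, floored at 0.
--     def go(xs):
--         if not xs: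
--             return (0, 0)
--         if len(xs) == 1:
--             d = 1 if xs[0] == 0 else -1
--             return (d, min(0, d))
--         mid = len(xs) // 2
--         s1, m1 = go(xs[:mid])
--         s2, m2 = go(xs[mid:])
--         return (s1 + s2, min(m1, s1 + m2))
--     _, m = go(A)
--     return -m if m < 0 else 0
-- ===== Notes on version B (the rewrite author's own statement) =====
-- stated objective: alternative
-- what changed: Replaces A's single left-to-right scan carrying (size, running max deficit) with a divide-and-conquer recursion that splits the list in half and combines (segment sum, minimum prefix sum) pairs via (s1+s2, min(m1, s1+m2)), then returns the negated overall minimum prefix floored at 0.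
import Mathlib
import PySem

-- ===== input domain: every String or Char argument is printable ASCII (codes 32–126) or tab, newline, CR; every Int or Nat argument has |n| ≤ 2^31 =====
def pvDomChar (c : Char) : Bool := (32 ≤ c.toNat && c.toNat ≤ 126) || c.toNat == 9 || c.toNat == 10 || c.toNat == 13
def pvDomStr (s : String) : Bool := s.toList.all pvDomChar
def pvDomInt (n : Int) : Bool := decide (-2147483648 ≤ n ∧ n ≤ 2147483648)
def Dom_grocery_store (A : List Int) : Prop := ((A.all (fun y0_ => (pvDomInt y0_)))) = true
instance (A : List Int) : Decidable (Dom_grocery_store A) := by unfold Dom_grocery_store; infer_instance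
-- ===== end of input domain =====

-- B replaces A's single scan with a divide-and-conquer recursion on halves,
-- combining (segment sum, min prefix sum) pairs (objective: alternative).

-- ===== PORT A =====
-- A's loop over i in range(n) with state (size, result); the structural recursion
-- consumes the elements A[i] in order.
def groLoopA : List Int → Int → Int → Int
  | [], _, result => result
  | a :: rest, size, result =>
    if a = 0 then groLoopA rest (size + 1) result
    else groLoopA rest (size - 1) (max result (-(size - 1)))

def grocery_store (A : List Int) : Int := groLoopA A 0 0

-- ===== PORT B =====
-- Source B's go: split at mid = len // 2, recurse on the halves, combine.
def groGo : List Int → Int × Int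
  | [] => (0, 0)
  | [x] =>
    let d : Int := if x = 0 then 1 else -1
    (d, min 0 d)
  | x :: y :: t =>
    let xs := x :: y :: t
    let mid := xs.length / 2
    let p1 := groGo (xs.take mid)
    let p2 := groGo (xs.drop mid)
    (p1.1 + p2.1, min p1.2 (p1.1 + p2.2))
termination_by xs => xs.length
decreasing_by
  · simp [List.length_take]; omega
  · simp [List.length_drop]; omega

def grocery_store_alt (A : List Int) : Int :=
  let m := (groGo A).2
  if m < 0 then -m else 0

-- ===== PRECONDITION & SPEC =====
def Spec_grocery_store (A : List Int) (out : Int) : Prop := out = grocery_store_alt A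
instance (A : List Int) (out : Int) : Decidable (Spec_grocery_store A out) := by unfold Spec_grocery_store; infer_instance

-- ===== CLAIM (what is proved, stated in full; the proofs are below) =====
def Claim_equal_grocery_store : Prop := ∀ (A : List Int), Dom_grocery_store A → Spec_grocery_store A (grocery_store A)

-- ===== LEMMAS AND PROOFS =====

-- delta of one element
def groD (x : Int) : Int := if x = 0 then 1 else -1

-- sum of deltas
def groS (xs : List Int) : Int := (xs.map groD).sum

-- minimum prefix sum (empty prefix included)
def groM : List Int → Int
  | [] => 0
  | x :: r => min 0 (groD x + groM r)

theorem groS_append (l r : List Int) : groS (l ++ r) = groS l + groS r := by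
  simp [groS]

theorem groM_nonpos (l : List Int) : groM l ≤ 0 := by
  cases l with
  | nil => simp [groM]
  | cons x r => simp [groM]

theorem groM_append (l r : List Int) : groM (l ++ r) = min (groM l) (groS l + groM r) := by
  induction l with
  | nil => have := groM_nonpos r; simp [groM, groS]; omega
  | cons x t ih =>
    simp only [List.cons_append, groM, ih, groS, List.map_cons, List.sum_cons]
    omega

theorem groGo_spec (xs : List Int) : groGo xs = (groS xs, groM xs) := by
  induction xs using groGo.induct with
  | case1 => simp [groGo, groS, groM]
  | case2 x => simp [groGo, groS, groM, groD]
  | case3 x y t xs mid ih1 ih2 =>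
    rw [groGo]
    rw [ih1, ih2]
    have htd := List.take_append_drop mid xs
    have hs := groS_append (xs.take mid) (xs.drop mid)
    have hm := groM_append (xs.take mid) (xs.drop mid)
    rw [htd] at hs hm
    exact Prod.ext (by exact hs.symm) (by exact hm.symm)

theorem groLoopA_hoist : ∀ (A : List Int) (s r : Int), 0 ≤ r →
    groLoopA A s r = max r (groLoopA A s 0) := by
  intro A
  induction A with
  | nil => intro s r hr; simp [groLoopA]; omega
  | cons x rest ih =>
    intro s r hr
    simp only [groLoopA]
    split_ifs with hx
    · exact ih _ r hr
    · rw [ih (s - 1) (max r (-(s - 1))) (by omega),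
          ih (s - 1) (max 0 (-(s - 1))) (by omega)]
      omega

theorem groLoopA_min : ∀ (A : List Int) (s : Int),
    groLoopA A s (max 0 (-s)) = max 0 (-(s + groM A)) := by
  intro A
  induction A with
  | nil => intro s; simp [groLoopA, groM]
  | cons x rest ih =>
    intro s
    simp only [groLoopA, groM, groD]
    split_ifs with hx
    · have h1 := ih (s + 1)
      have h2 := groLoopA_hoist rest (s + 1) (max 0 (-s)) (by omega)
      have h3 := groLoopA_hoist rest (s + 1) (max 0 (-(s + 1))) (by omega)
      rw [h2]; rw [h3] at h1
      omega -- groM rest and groLoopA rest (s+1) 0 are atoms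
    · have h1 := ih (s - 1)
      have h2 := groLoopA_hoist rest (s - 1) (max (max 0 (-s)) (-(s - 1))) (by omega)
      have h3 := groLoopA_hoist rest (s - 1) (max 0 (-(s - 1))) (by omega)
      rw [h2]; rw [h3] at h1
      omega

-- ===== VERDICT (by name: the statement is the Claim_ definition above) =====
theorem grocery_store_spec : Claim_equal_grocery_store := by
  intro A _
  unfold Spec_grocery_store grocery_store grocery_store_alt
  rw [groGo_spec]
  have h := groLoopA_min A 0
  simp only [neg_zero, max_self, zero_add] at h
  simp only [h]
  omega
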